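-- pv_equiv track=rewrite | github.com/SangwhaLee/algorithm-prob | 0916/boj20058_마법사상어와파이어스톰/boj20058_마법사상어와파이어스톰.py | rotate_melting
-- ===== SOURCE A (Python) =====
-- def rotate_melting(ice, N, L):
--     new_ice = [[0]*(2**N) for _ in range(2**N)]
--
--     size = 2**L
--     for y in range(0, 2 ** N, size):
--         for x in range(0, 2 ** N, size):
--             for i in range(size):
--                 for j in range(size):
--                     new_ice[y+j][x+size-i-1] = ice[y+i][x+j]
--
--     ice = new_ice
--     temp = []
--     for i in range(2**N):
--         for j in range(2**N):
--             cnt = 0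
--             for k in range(4):
--                 ni = i + di[k]
--                 nj = j + dj[k]
--                 if ni < 0 or ni >= 2**N or nj < 0 or nj >= 2**N:
--                     continue
--                 if ice[ni][nj] != 0:
--                     cnt += 1
--             if cnt < 3 and ice[i][j] !=0:
--                 temp.append((i,j))
--
--     for i, j in temp:
--         ice[i][j] -= 1
--
--     return ice
--
-- di = [-1,1,0,0]
--
-- dj = [0,0,-1,1]
-- ===== SOURCE B (Python) =====
-- def rotate_melting(ice, N, L):
--     n = 2 ** N
--     s = 2 ** L
--     m = n // s
--
--     # Phase 1: rotate every s x s block in place, computed as one GLOBAL 90-degree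
--     # clockwise rotation of the whole n x n grid followed by a block-permutation
--     # gather: rotating the whole grid rotates each block correctly but moves block
--     # (q, k) to position (k, m-1-q), so output block (q, k) is read back from
--     # global-rotated block (k, m-1-q) via row slices.
--     G = [list(r) for r in zip(*reversed([row[:n] for row in ice[:n]]))]
--     grid = [[v for k in range(m) for v in G[k * s + j][(m - 1 - q) * s:(m - q) * s]]
--             for q in range(m) for j in range(s)]
--
--     # Phase 2: melting via whole-row shifted nonzero masks: cnt[r][c] is the
--     # elementwise sum of the up/down rows' masks and the current row's mask
--     # shifted right/left, so no per-cell neighbour probing is needed.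
--     zero = [0] * n
--     mask = [[1 if v != 0 else 0 for v in row] for row in grid]
--     out = []
--     for r in range(n):
--         up = mask[r - 1] if r > 0 else zero
--         dn = mask[r + 1] if r < n - 1 else zero
--         row = mask[r]
--         left = [0] + row[:-1]
--         right = row[1:] + [0]
--         cnt = [a + b + c + d for a, b, c, d in zip(up, dn, left, right)]
--         out.append([v - 1 if v != 0 and k < 3 else v
--                     for v, k in zip(grid[r], cnt)])
--     return out
-- ===== Notes on version B (the rewrite author's own statement) =====
-- stated objective: alternative
-- what changed: Rotation is done as ONE global 90-degree rotation of the whole grid (zip of reversed rows) followed by a block-permutation gather via row slices, instead of A's per-block quadruple write loop; melting is computed from whole-row shifted nonzero masks summed elementwise, instead of A's per-cell four-neighbour probing with a collected temp list.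
import Mathlib
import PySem

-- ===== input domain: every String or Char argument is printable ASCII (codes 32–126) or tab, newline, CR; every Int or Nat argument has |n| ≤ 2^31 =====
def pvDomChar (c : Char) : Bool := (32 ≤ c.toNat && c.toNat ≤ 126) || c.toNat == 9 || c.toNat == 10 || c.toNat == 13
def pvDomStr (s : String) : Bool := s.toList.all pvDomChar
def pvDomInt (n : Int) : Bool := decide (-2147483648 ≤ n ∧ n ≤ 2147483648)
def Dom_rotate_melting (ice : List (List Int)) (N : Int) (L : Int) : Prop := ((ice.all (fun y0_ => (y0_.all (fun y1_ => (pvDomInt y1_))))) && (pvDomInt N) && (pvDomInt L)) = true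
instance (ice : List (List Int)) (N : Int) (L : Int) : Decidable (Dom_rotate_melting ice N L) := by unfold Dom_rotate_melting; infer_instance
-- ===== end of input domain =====

-- B replaces A's per-block quadruple write loop by ONE global 90° rotation of the whole grid followed by a
-- block-permutation gather via row slices, and replaces the per-cell neighbour probing by whole-row shifted
-- nonzero masks summed elementwise (objective: alternative; neither side mutates its argument).

-- shared small helpers: Python 2-d indexing / assignment (indices in range on every admitted input)
def pvGet2 (g : List (List Int)) (i j : Nat) : Int := (g.getD i []).getD j 0
def pvSet2 (g : List (List Int)) (i j : Nat) (v : Int) : List (List Int) :=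
  g.set i ((g.getD i []).set j v)

-- ===== PORT A =====
def pvDi : List Int := [-1, 1, 0, 0]
def pvDj : List Int := [0, 0, -1, 1]

def rotate_melting (ice : List (List Int)) (N : Int) (L : Int) : List (List Int) :=
  let nn : Nat := 2 ^ N.toNat
  let size : Nat := 2 ^ L.toNat
  let new_ice : List (List Int) := (List.range nn).map (fun _ => List.replicate nn (0 : Int))
  let ice2 : List (List Int) :=
    (PySem.List.pyRange 0 (nn : Int) (size : Int)).foldl (fun g y =>
      (PySem.List.pyRange 0 (nn : Int) (size : Int)).foldl (fun g x =>
        (List.range size).foldl (fun g i =>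
          (List.range size).foldl (fun g j =>
            pvSet2 g (y.toNat + j) (x.toNat + size - i - 1)
              (pvGet2 ice (y.toNat + i) (x.toNat + j))) g) g) g) new_ice
  let temp : List (Nat × Nat) :=
    (List.range nn).foldl (fun (t : List (Nat × Nat)) (i : Nat) =>
      (List.range nn).foldl (fun t (j : Nat) =>
        let cnt : Int := (List.range 4).foldl (fun c k =>
          let ni : Int := (i : Int) + pvDi.getD k 0
          let nj : Int := (j : Int) + pvDj.getD k 0
          if ni < 0 ∨ (nn : Int) ≤ ni ∨ nj < 0 ∨ (nn : Int) ≤ nj then c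
          else if pvGet2 ice2 ni.toNat nj.toNat ≠ 0 then c + 1 else c) 0
        if cnt < 3 ∧ pvGet2 ice2 i j ≠ 0 then t ++ [(i, j)] else t) t) []
  temp.foldl (fun g p => pvSet2 g p.1 p.2 (pvGet2 g p.1 p.2 - 1)) ice2

-- ===== PORT B =====
-- zip(*rows) for a list of Int-rows: tuples up to the shortest row (each tuple becomes a row list)
def pyZipStar (rows : List (List Int)) : List (List Int) :=
  match rows with
  | [] => []
  | _ :: _ => (List.range ((rows.map List.length).min?.getD 0)).map
      (fun a => rows.map (fun r => r.getD a 0))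

def rotate_melting_alt (ice : List (List Int)) (N : Int) (L : Int) : List (List Int) :=
  let n : Nat := 2 ^ N.toNat
  let s : Nat := 2 ^ L.toNat
  let m : Nat := n / s
  -- G = [list(r) for r in zip(*reversed([row[:n] for row in ice[:n]]))]
  let G : List (List Int) := pyZipStar
    (((PySem.List.slice ice none (some (n : Int))).map
        (fun row => PySem.List.slice row none (some (n : Int)))).reverse)
  -- grid = [[v for k ... for v in G[k*s+j][(m-1-q)*s:(m-q)*s]] for q ... for j ...]
  let grid : List (List Int) := (List.range m).flatMap (fun q => (List.range s).map (fun j =>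
      (List.range m).flatMap (fun k =>
        PySem.List.slice (G.getD (k * s + j) [])
          (some (((m - 1 - q) * s : Nat) : Int)) (some (((m - q) * s : Nat) : Int)))))
  let zero : List Int := List.replicate n (0 : Int)
  let mask : List (List Int) := grid.map (fun row => row.map (fun v => if v ≠ 0 then (1 : Int) else 0))
  (List.range n).foldl (fun out r =>
    let up := if 0 < r then mask.getD (r - 1) [] else zero
    let dn := if r < n - 1 then mask.getD (r + 1) [] else zero
    let row := mask.getD r []
    let left := 0 :: PySem.List.slice row none (some (-1))       -- [0] + row[:-1]
    let right := PySem.List.slice row (some 1) none ++ [0]       -- row[1:] + [0]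
    -- zip(up, dn, left, right) ported as nested pairs (same truncation rule)
    let cnt := ((up.zip dn).zip (left.zip right)).map (fun p => p.1.1 + p.1.2 + p.2.1 + p.2.2)
    out ++ [((grid.getD r []).zip cnt).map (fun p => if p.1 ≠ 0 ∧ p.2 < 3 then p.1 - 1 else p.1)]) []

-- ===== PRECONDITION & SPEC =====
-- Pre_ = exactly the inputs on which Python A returns: 2**N and 2**L must be ints (N,L ≥ 0), every
-- rotated block must fit in the 2^N × 2^N output (L ≤ N; otherwise the write raises IndexError),
-- and the first 2^N rows of ice must exist and have ≥ 2^N entries (otherwise the read raises).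
def Pre_rotate_melting (ice : List (List Int)) (N : Int) (L : Int) : Prop :=
  0 ≤ N ∧ 0 ≤ L ∧ L ≤ N ∧ 2 ^ N.toNat ≤ ice.length ∧
    ∀ row ∈ ice.take (2 ^ N.toNat), 2 ^ N.toNat ≤ row.length
instance (ice : List (List Int)) (N : Int) (L : Int) : Decidable (Pre_rotate_melting ice N L) := by
  unfold Pre_rotate_melting; infer_instance

def pvWitness_rotate_melting : List (List Int) × Int × Int := ([[1, 2], [3, 0]], 1, 1)

def Spec_rotate_melting (ice : List (List Int)) (N : Int) (L : Int) (out : List (List Int)) : Prop := out = rotate_melting_alt ice N L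
instance (ice : List (List Int)) (N : Int) (L : Int) (out : List (List Int)) : Decidable (Spec_rotate_melting ice N L out) := by unfold Spec_rotate_melting; infer_instance

-- ===== CLAIM (what is proved, stated in full; the proofs are below) =====
def Claim_equal_rotate_melting : Prop := ∀ (ice : List (List Int)) (N : Int) (L : Int), Dom_rotate_melting ice N L → Pre_rotate_melting ice N L → Spec_rotate_melting ice N L (rotate_melting ice N L)

-- ===== LEMMAS AND PROOFS =====

-- grids as tabulations of a function over [0,nn) × [0,nn)
def mkG (nn : Nat) (f : Nat → Nat → Int) : List (List Int) :=
  (List.range nn).map (fun r => (List.range nn).map (f r))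

-- the common closed form BOTH ports are reduced to: per-block-rotated grid, then conditional decrement
def modelOut (ice : List (List Int)) (nn s : Nat) : List (List Int) :=
  mkG nn (fun r c =>
    if pvGet2 ice (r / s * s + (s - 1 - c % s)) (c / s * s + r % s) ≠ 0 ∧
        (if 0 < r ∧ pvGet2 (mkG nn (fun r c => pvGet2 ice (r / s * s + (s - 1 - c % s)) (c / s * s + r % s))) (r - 1) c ≠ 0 then (1 : Int) else 0) +
        (if r < nn - 1 ∧ pvGet2 (mkG nn (fun r c => pvGet2 ice (r / s * s + (s - 1 - c % s)) (c / s * s + r % s))) (r + 1) c ≠ 0 then 1 else 0) +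
        (if 0 < c ∧ pvGet2 (mkG nn (fun r c => pvGet2 ice (r / s * s + (s - 1 - c % s)) (c / s * s + r % s))) r (c - 1) ≠ 0 then 1 else 0) +
        (if c < nn - 1 ∧ pvGet2 (mkG nn (fun r c => pvGet2 ice (r / s * s + (s - 1 - c % s)) (c / s * s + r % s))) r (c + 1) ≠ 0 then 1 else 0) < 3
    then pvGet2 ice (r / s * s + (s - 1 - c % s)) (c / s * s + r % s) - 1
    else pvGet2 ice (r / s * s + (s - 1 - c % s)) (c / s * s + r % s))

theorem getD_range_map {α : Type} (nn : Nat) (g : Nat → α) (d : α) (r : Nat) :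
    ((List.range nn).map g).getD r d = if r < nn then g r else d := by
  by_cases h : r < nn
  · rw [List.getD_eq_getElem?_getD]
    simp [h]
  · rw [List.getD_eq_getElem?_getD]
    rw [List.getElem?_eq_none (by simpa using Nat.le_of_not_lt h)]
    simp [h]

theorem pvGet2_mk (nn : Nat) (f : Nat → Nat → Int) (r c : Nat) :
    pvGet2 (mkG nn f) r c = if r < nn ∧ c < nn then f r c else 0 := by
  unfold pvGet2 mkG
  rw [getD_range_map]
  by_cases hr : r < nn
  · rw [if_pos hr, getD_range_map]
    by_cases hc : c < nn
    · simp [hr, hc]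
    · simp [hr, hc]
  · simp [hr]

theorem set_range_map {α : Type} (nn : Nat) (g : Nat → α) (r : Nat) (v : α) :
    ((List.range nn).map g).set r v = (List.range nn).map (fun t => if t = r then v else g t) := by
  apply List.ext_getElem
  · simp
  · intro i h1 h2
    simp only [List.length_map, List.length_range] at h2
    by_cases hi : i = r
    · subst hi
      simp
    · simp [hi, Ne.symm hi]

theorem mkG_congr (nn : Nat) (f g : Nat → Nat → Int)
    (h : ∀ r < nn, ∀ c < nn, f r c = g r c) : mkG nn f = mkG nn g := by
  unfold mkG
  apply List.map_congr_left
  intro r hr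
  apply List.map_congr_left
  intro c hcm
  exact h r (List.mem_range.mp hr) c (List.mem_range.mp hcm)

theorem pvSet2_mk (nn : Nat) (f : Nat → Nat → Int) (r c : Nat) (v : Int)
    (hr : r < nn) (_hc : c < nn) :
    pvSet2 (mkG nn f) r c v = mkG nn (fun r' c' => if r' = r ∧ c' = c then v else f r' c') := by
  unfold pvSet2 mkG
  rw [getD_range_map, if_pos hr, set_range_map, set_range_map]
  congr 1
  funext t
  by_cases ht : t = r
  · subst ht
    rw [if_pos rfl]
    apply List.map_congr_left
    intro c' _
    by_cases hc' : c' = c <;> simp [hc']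
  · simp only [if_neg ht]
    apply List.map_congr_left
    intro c' _
    simp [ht]

-- the innermost j-loop: writes one column segment
theorem rotJ (nn : Nat) (t y C : Nat) (w : Nat → Int) (f : Nat → Nat → Int)
    (hy : y + t ≤ nn) (hC : C < nn) :
    (List.range t).foldl (fun g j => pvSet2 g (y + j) C (w j)) (mkG nn f)
      = mkG nn (fun r c => if c = C ∧ y ≤ r ∧ r < y + t then w (r - y) else f r c) := by
  induction t generalizing f with
  | zero =>
      simp only [List.range_zero, List.foldl_nil]
      apply mkG_congr
      intro r _ c _
      rw [if_neg]
      omega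
  | succ t ih =>
      rw [List.range_succ, List.foldl_append, ih f (by omega), List.foldl_cons, List.foldl_nil,
        pvSet2_mk nn _ _ _ _ (by omega) hC]
      apply mkG_congr
      intro r hr c hc
      by_cases h1 : r = y + t ∧ c = C
      · obtain ⟨h1a, h1b⟩ := h1
        have hw : r - y = t := by omega
        rw [if_pos ⟨h1a, h1b⟩, if_pos ⟨h1b, by omega, by omega⟩, hw]
      · rw [if_neg h1]
        by_cases h2 : c = C ∧ y ≤ r ∧ r < y + t
        · rw [if_pos h2, if_pos (show c = C ∧ y ≤ r ∧ r < y + (t + 1) from ⟨h2.1, h2.2.1, by omega⟩)]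
        · rw [if_neg h2, if_neg (by omega)]

-- the i-loop: one (partial) block rotation
theorem rotI (ice : List (List Int)) (nn size : Nat) (t y x : Nat) (f : Nat → Nat → Int)
    (hy : y + size ≤ nn) (hx : x + size ≤ nn) (ht : t ≤ size) :
    (List.range t).foldl (fun g i =>
        (List.range size).foldl (fun g j =>
          pvSet2 g (y + j) (x + size - i - 1) (pvGet2 ice (y + i) (x + j))) g)
      (mkG nn f)
      = mkG nn (fun r c =>
          if y ≤ r ∧ r < y + size ∧ x + size - t ≤ c ∧ c < x + size
          then pvGet2 ice (y + (x + size - 1 - c)) (x + (r - y)) else f r c) := by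
  induction t generalizing f with
  | zero =>
      simp only [List.range_zero, List.foldl_nil]
      apply mkG_congr
      intro r _ c _
      rw [if_neg]
      omega
  | succ t ih =>
      rw [List.range_succ, List.foldl_append, ih f (by omega), List.foldl_cons, List.foldl_nil,
        rotJ nn size (y := y) (C := x + size - t - 1) (w := fun j => pvGet2 ice (y + t) (x + j)) _ hy (by omega)]
      apply mkG_congr
      intro r hr c hc
      by_cases h1 : c = x + size - t - 1 ∧ y ≤ r ∧ r < y + size
      · obtain ⟨h1a, h1b, h1c⟩ := h1
        have hv : x + size - 1 - c = t := by omega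
        rw [if_pos ⟨h1a, h1b, h1c⟩,
          if_pos (show y ≤ r ∧ r < y + size ∧ x + size - (t + 1) ≤ c ∧ c < x + size from
            ⟨h1b, h1c, by omega, by omega⟩), hv]
      · by_cases h2 : y ≤ r ∧ r < y + size ∧ x + size - t ≤ c ∧ c < x + size
        · rw [if_neg h1, if_pos h2, if_pos ⟨h2.1, h2.2.1, by omega, h2.2.2.2⟩]
        · rw [if_neg h1, if_neg h2, if_neg (by omega)]

-- the x-loop over block columns
theorem rotX (ice : List (List Int)) (nn size m : Nat) (t y : Nat) (f : Nat → Nat → Int)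
    (hs : 0 < size) (hnn : nn = m * size) (hy : y + size ≤ nn) (ht : t ≤ m) :
    (List.range t).foldl (fun g k =>
        (List.range size).foldl (fun g i =>
          (List.range size).foldl (fun g j =>
            pvSet2 g (y + j) (k * size + size - i - 1) (pvGet2 ice (y + i) (k * size + j))) g) g)
      (mkG nn f)
      = mkG nn (fun r c =>
          if y ≤ r ∧ r < y + size ∧ c < t * size
          then pvGet2 ice (y + (size - 1 - c % size)) (c / size * size + (r - y)) else f r c) := by
  induction t generalizing f with
  | zero =>
      simp only [List.range_zero, List.foldl_nil]
      apply mkG_congr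
      intro r _ c _
      rw [if_neg]
      omega
  | succ t ih =>
      have hsm : (t + 1) * size = t * size + size := Nat.succ_mul t size
      have hts : t * size + size ≤ nn := by
        have h1 : (t + 1) * size ≤ m * size := Nat.mul_le_mul_right _ (by omega)
        omega
      rw [List.range_succ, List.foldl_append, ih f (by omega), List.foldl_cons, List.foldl_nil,
        rotI ice nn size size y (t * size) _ hy hts (le_refl size)]
      apply mkG_congr
      intro r hr c hc
      by_cases h1 : y ≤ r ∧ r < y + size ∧ t * size + size - size ≤ c ∧ c < t * size + size
      · have hdiv : c / size = t := Nat.div_eq_of_lt_le (by omega) (by omega)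
        have hmod : c % size = c - t * size := by
          have hdm := Nat.div_add_mod c size
          rw [hdiv, Nat.mul_comm] at hdm
          omega
        have e1 : t * size + size - 1 - c = size - 1 - c % size := by omega
        rw [if_pos h1,
          if_pos (show y ≤ r ∧ r < y + size ∧ c < (t + 1) * size from ⟨h1.1, h1.2.1, by omega⟩),
          e1, hdiv]
      · rw [if_neg h1]
        by_cases h2 : y ≤ r ∧ r < y + size ∧ c < t * size
        · rw [if_pos h2, if_pos ⟨h2.1, h2.2.1, by omega⟩]
        · rw [if_neg h2, if_neg (by omega)]

-- the y-loop over block rows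
theorem rotY (ice : List (List Int)) (nn size m : Nat) (t : Nat) (f : Nat → Nat → Int)
    (hs : 0 < size) (hnn : nn = m * size) (ht : t ≤ m) :
    (List.range t).foldl (fun g q =>
        (List.range m).foldl (fun g k =>
          (List.range size).foldl (fun g i =>
            (List.range size).foldl (fun g j =>
              pvSet2 g (q * size + j) (k * size + size - i - 1)
                (pvGet2 ice (q * size + i) (k * size + j))) g) g) g)
      (mkG nn f)
      = mkG nn (fun r c =>
          if r < t * size
          then pvGet2 ice (r / size * size + (size - 1 - c % size)) (c / size * size + r % size)
          else f r c) := by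
  induction t generalizing f with
  | zero =>
      simp only [List.range_zero, List.foldl_nil]
      apply mkG_congr
      intro r _ c _
      rw [if_neg]
      omega
  | succ t ih =>
      have hsm : (t + 1) * size = t * size + size := Nat.succ_mul t size
      have hts : t * size + size ≤ nn := by
        have h1 : (t + 1) * size ≤ m * size := Nat.mul_le_mul_right _ (by omega)
        omega
      rw [List.range_succ, List.foldl_append, ih f (by omega), List.foldl_cons, List.foldl_nil,
        rotX ice nn size m m (t * size) _ hs hnn hts (le_refl m)]
      apply mkG_congr
      intro r hr c hc
      by_cases h1 : t * size ≤ r ∧ r < t * size + size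
      · have hdiv : r / size = t := Nat.div_eq_of_lt_le (by omega) (by omega)
        have hmod : r % size = r - t * size := by
          have hdm := Nat.div_add_mod r size
          rw [hdiv, Nat.mul_comm] at hdm
          omega
        rw [if_pos (show t * size ≤ r ∧ r < t * size + size ∧ c < m * size from
            ⟨h1.1, h1.2, by omega⟩),
          if_pos (show r < (t + 1) * size by omega), hdiv, hmod]
      · rw [if_neg (show ¬(t * size ≤ r ∧ r < t * size + size ∧ c < m * size) by omega)]
        by_cases h2 : r < t * size
        · rw [if_pos h2, if_pos (by omega)]
        · rw [if_neg h2, if_neg (by omega)]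

-- range(0, m*size, size) is the list of block origins
theorem pyRange_blocks (m size : Nat) (hs : 0 < size) :
    PySem.List.pyRange 0 ((m * size : Nat) : Int) ((size : Nat) : Int)
      = (List.range m).map (fun k => ((k * size : Nat) : Int)) := by
  rw [PySem.List.pyRange_of_pos _ _ (by exact_mod_cast hs)]
  rcases Nat.eq_zero_or_pos m with hm | hm
  · subst hm
    simp
  · have hpos : (0 : Int) < ((m * size : Nat) : Int) := by
      exact_mod_cast Nat.mul_pos hm hs
    rw [if_pos hpos]
    have hcast : ((m * size : Nat) : Int) - 0 + (size : Int) - 1 = ((m * size + size - 1 : Nat) : Int) := by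
      omega
    have hdiv : (((m * size + size - 1 : Nat) : Int)) / ((size : Nat) : Int) = ((m : Nat) : Int) := by
      rw [← Int.natCast_div]
      congr 1
      rw [Nat.mul_comm m size]
      have e : size * m + size - 1 = size * m + (size - 1) := by omega
      rw [e, Nat.mul_add_div hs, Nat.div_eq_of_lt (by omega), Nat.add_zero]
    rw [hcast, hdiv, Int.toNat_natCast]
    apply List.map_congr_left
    intro k _
    push_cast
    ring

-- a guarded neighbour-test step equals adding an indicator
theorem stepEq (c : Int) (skip hit P : Prop) [Decidable skip] [Decidable hit] [Decidable P]
    (h : P ↔ ¬skip ∧ hit) :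
    (if skip then c else if hit then c + 1 else c) = c + (if P then 1 else 0) := by
  by_cases hs2 : skip
  · rw [if_pos hs2, if_neg (by rw [h]; tauto)]
    omega
  · rw [if_neg hs2]
    by_cases hh : hit
    · rw [if_pos hh, if_pos (h.mpr ⟨hs2, hh⟩)]
    · rw [if_neg hh, if_neg (by rw [h]; tauto)]
      omega

-- append-if loop is a filter (Prop-valued test)
theorem foldl_append_ite {α β : Type} (p : α → Prop) [DecidablePred p] (f : α → β)
    (l : List α) (acc : List β) :
    l.foldl (fun acc x => if p x then acc ++ [f x] else acc) acc
      = acc ++ (l.filter (fun x => decide (p x))).map f := by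
  induction l generalizing acc with
  | nil => simp
  | cons x l ih =>
      rw [List.foldl_cons]
      by_cases hx : p x
      · rw [if_pos hx, ih, List.filter_cons_of_pos (by simpa using hx)]
        simp
      · rw [if_neg hx, ih, List.filter_cons_of_neg (by simpa using hx)]

-- folding distinct in-range decrements is a pointwise conditional decrement
theorem decFold (nn : Nat) (ps : List (Nat × Nat)) (f : Nat → Nat → Int)
    (hnd : ps.Nodup) (hin : ∀ p ∈ ps, p.1 < nn ∧ p.2 < nn) :
    ps.foldl (fun g p => pvSet2 g p.1 p.2 (pvGet2 g p.1 p.2 - 1)) (mkG nn f)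
      = mkG nn (fun r c => if (r, c) ∈ ps then f r c - 1 else f r c) := by
  induction ps generalizing f with
  | nil =>
      simp only [List.foldl_nil]
      apply mkG_congr
      intro r _ c _
      simp
  | cons p ps ih =>
      obtain ⟨p1, p2⟩ := p
      have hp := hin (p1, p2) (by simp)
      rw [List.foldl_cons]
      dsimp only
      rw [pvGet2_mk, if_pos ⟨hp.1, hp.2⟩, pvSet2_mk nn f p1 p2 _ hp.1 hp.2,
        ih _ hnd.of_cons (fun q hq => hin q (by simp [hq]))]
      apply mkG_congr
      intro r hr c hc
      by_cases h1 : r = p1 ∧ c = p2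
      · have hnotin : (r, c) ∉ ps := by
          rw [h1.1, h1.2]
          exact (List.nodup_cons.mp hnd).1
        rw [if_neg hnotin, if_pos h1,
          if_pos (show (r, c) ∈ (p1, p2) :: ps by rw [h1.1, h1.2]; simp), h1.1, h1.2]
      · by_cases h2 : (r, c) ∈ ps
        · rw [if_pos h2, if_neg h1, if_pos (List.mem_cons_of_mem _ h2)]
        · rw [if_neg h2, if_neg h1, if_neg (show (r, c) ∉ (p1, p2) :: ps by
            intro hmem
            rcases List.mem_cons.mp hmem with he | hm
            · injection he with ha hb
              exact h1 ⟨ha, hb⟩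
            · exact h2 hm)]

-- A's range-4 neighbour loop equals the sum of four guarded indicators
theorem cntEq (g : List (List Int)) (nn i j : Nat) (hi : i < nn) (hj : j < nn) :
    (List.range 4).foldl (fun (c : Int) (k : Nat) =>
        if (i : Int) + pvDi.getD k 0 < 0 ∨ (nn : Int) ≤ (i : Int) + pvDi.getD k 0 ∨
           (j : Int) + pvDj.getD k 0 < 0 ∨ (nn : Int) ≤ (j : Int) + pvDj.getD k 0 then c
        else if pvGet2 g ((i : Int) + pvDi.getD k 0).toNat ((j : Int) + pvDj.getD k 0).toNat ≠ 0
        then c + 1 else c) (0 : Int)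
      = (if 0 < i ∧ pvGet2 g (i - 1) j ≠ 0 then 1 else 0) +
        (if i < nn - 1 ∧ pvGet2 g (i + 1) j ≠ 0 then 1 else 0) +
        (if 0 < j ∧ pvGet2 g i (j - 1) ≠ 0 then 1 else 0) +
        (if j < nn - 1 ∧ pvGet2 g i (j + 1) ≠ 0 then 1 else 0) := by
  have hr4 : List.range 4 = [0, 1, 2, 3] := by decide
  rw [hr4]
  simp only [List.foldl_cons, List.foldl_nil]
  rw [show pvDi.getD 0 0 = (-1 : Int) from rfl, show pvDi.getD 1 0 = (1 : Int) from rfl,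
    show pvDi.getD 2 0 = (0 : Int) from rfl, show pvDi.getD 3 0 = (0 : Int) from rfl,
    show pvDj.getD 0 0 = (0 : Int) from rfl, show pvDj.getD 1 0 = (0 : Int) from rfl,
    show pvDj.getD 2 0 = (-1 : Int) from rfl, show pvDj.getD 3 0 = (1 : Int) from rfl]
  simp only [add_zero]
  have t1 : ((i : Int) + -1).toNat = i - 1 := by omega
  have t2 : ((i : Int) + 1).toNat = i + 1 := by omega
  have t3 : ((j : Int) + -1).toNat = j - 1 := by omega
  have t4 : ((j : Int) + 1).toNat = j + 1 := by omega
  have t5 : ((i : Int)).toNat = i := by omega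
  have t6 : ((j : Int)).toNat = j := by omega
  simp only [t1, t2, t3, t4, t5, t6]
  have s1 := fun c => stepEq c
      ((i : Int) + -1 < 0 ∨ (nn : Int) ≤ (i : Int) + -1 ∨ (j : Int) < 0 ∨ (nn : Int) ≤ (j : Int))
      (pvGet2 g (i - 1) j ≠ 0) (0 < i ∧ pvGet2 g (i - 1) j ≠ 0)
      (by constructor
          · rintro ⟨h1, h2⟩
            exact ⟨by omega, h2⟩
          · rintro ⟨h1, h2⟩
            exact ⟨by omega, h2⟩)
  have s2 := fun c => stepEq c
      ((i : Int) + 1 < 0 ∨ (nn : Int) ≤ (i : Int) + 1 ∨ (j : Int) < 0 ∨ (nn : Int) ≤ (j : Int))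
      (pvGet2 g (i + 1) j ≠ 0) (i < nn - 1 ∧ pvGet2 g (i + 1) j ≠ 0)
      (by constructor
          · rintro ⟨h1, h2⟩
            exact ⟨by omega, h2⟩
          · rintro ⟨h1, h2⟩
            exact ⟨by omega, h2⟩)
  have s3 := fun c => stepEq c
      ((i : Int) < 0 ∨ (nn : Int) ≤ (i : Int) ∨ (j : Int) + -1 < 0 ∨ (nn : Int) ≤ (j : Int) + -1)
      (pvGet2 g i (j - 1) ≠ 0) (0 < j ∧ pvGet2 g i (j - 1) ≠ 0)
      (by constructor
          · rintro ⟨h1, h2⟩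
            exact ⟨by omega, h2⟩
          · rintro ⟨h1, h2⟩
            exact ⟨by omega, h2⟩)
  have s4 := fun c => stepEq c
      ((i : Int) < 0 ∨ (nn : Int) ≤ (i : Int) ∨ (j : Int) + 1 < 0 ∨ (nn : Int) ≤ (j : Int) + 1)
      (pvGet2 g i (j + 1) ≠ 0) (j < nn - 1 ∧ pvGet2 g i (j + 1) ≠ 0)
      (by constructor
          · rintro ⟨h1, h2⟩
            exact ⟨by omega, h2⟩
          · rintro ⟨h1, h2⟩
            exact ⟨by omega, h2⟩)
  simp only [s1, s2, s3, s4]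
  omega

theorem ite_and_comm (A B : Prop) [Decidable A] [Decidable B] (u v : Int) :
    (if A ∧ B then u else v) = (if B ∧ A then u else v) := by
  by_cases hA : A <;> by_cases hB : B <;> simp [hA, hB]

-- the whole melting pass of A: collect the cells satisfying p, then decrement them
theorem tempChar (nn : Nat) (p : Nat → Nat → Prop) [inst : ∀ i j, Decidable (p i j)]
    (f : Nat → Nat → Int) :
    ((List.range nn).foldl (fun (t : List (Nat × Nat)) (i : Nat) =>
        (List.range nn).foldl (fun (t : List (Nat × Nat)) (j : Nat) =>
          if p i j then t ++ [(i, j)] else t) t) []).foldl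
      (fun g q => pvSet2 g q.1 q.2 (pvGet2 g q.1 q.2 - 1)) (mkG nn f)
      = mkG nn (fun r c => if p r c then f r c - 1 else f r c) := by
  have htemp : (List.range nn).foldl (fun (t : List (Nat × Nat)) (i : Nat) =>
        (List.range nn).foldl (fun (t : List (Nat × Nat)) (j : Nat) =>
          if p i j then t ++ [(i, j)] else t) t) []
      = (List.range nn).flatMap (fun i =>
          ((List.range nn).filter (fun j => decide (p i j))).map (fun j => (i, j))) := by
    simp only [foldl_append_ite]
    rw [PySem.List.foldl_append_eq_flatMap, List.nil_append]
  have hmem : ∀ a b : Nat,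
      (a, b) ∈ (List.range nn).flatMap (fun i =>
          ((List.range nn).filter (fun j => decide (p i j))).map (fun j => (i, j)))
        ↔ a < nn ∧ b < nn ∧ p a b := by
    intro a b
    constructor
    · intro h
      obtain ⟨i, hi, hmem2⟩ := List.mem_flatMap.mp h
      obtain ⟨j, hj, heq⟩ := List.mem_map.mp hmem2
      obtain ⟨hjr, hpj⟩ := List.mem_filter.mp hj
      injection heq with e1 e2
      subst e1
      subst e2
      exact ⟨List.mem_range.mp hi, List.mem_range.mp hjr, of_decide_eq_true hpj⟩
    · rintro ⟨ha, hb, hp⟩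
      exact List.mem_flatMap.mpr ⟨a, List.mem_range.mpr ha,
        List.mem_map.mpr ⟨b, List.mem_filter.mpr ⟨List.mem_range.mpr hb, decide_eq_true hp⟩, rfl⟩⟩
  have hnodup : ((List.range nn).flatMap (fun i =>
      ((List.range nn).filter (fun j => decide (p i j))).map (fun j => (i, j)))).Nodup := by
    apply List.nodup_flatMap.mpr
    constructor
    · intro i _
      exact List.Nodup.map (fun a b h => by injection h) (List.nodup_range.filter _)
    · refine List.pairwise_lt_range.imp ?_
      intro a b hab x hx hy
      obtain ⟨j1, _, e1⟩ := List.mem_map.mp hx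
      obtain ⟨j2, _, e2⟩ := List.mem_map.mp hy
      rw [← e1] at e2
      injection e2 with e3 _
      omega
  rw [htemp, decFold nn _ f hnodup (fun q hq => by
    obtain ⟨a, b⟩ := q
    have h := (hmem a b).mp hq
    exact ⟨h.1, h.2.1⟩)]
  apply mkG_congr
  intro r hr c hc
  simp only [hmem]
  by_cases hp : p r c
  · rw [if_pos ⟨hr, hc, hp⟩, if_pos hp]
  · rw [if_neg (by tauto), if_neg hp]

-- ===== A reduces to the closed form =====
theorem A_to_model (ice : List (List Int)) (N L : Int)
    (hpre : Pre_rotate_melting ice N L) :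
    rotate_melting ice N L = modelOut ice (2 ^ N.toNat) (2 ^ L.toNat) := by
  obtain ⟨hN, hL, hLN, _, _⟩ := hpre
  unfold rotate_melting modelOut
  dsimp only
  set nn : Nat := 2 ^ N.toNat with hnn0
  set size : Nat := 2 ^ L.toNat with hsize0
  have hs : 0 < size := Nat.two_pow_pos _
  set m : Nat := 2 ^ (N.toNat - L.toNat) with hm0
  have hnn : nn = m * size := by
    rw [hnn0, hsize0, hm0, ← pow_add]
    congr 1
    omega
  have hnew : (List.range nn).map (fun _ => List.replicate nn (0 : Int)) = mkG nn (fun _ _ => 0) := by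
    unfold mkG
    apply List.map_congr_left
    intro r _
    symm
    rw [List.map_const', List.length_range]
  have hpr : PySem.List.pyRange 0 (nn : Int) (size : Int)
      = (List.range m).map (fun k => ((k * size : Nat) : Int)) := by
    rw [hnn]
    exact pyRange_blocks m size hs
  simp only [hnew, hpr, List.foldl_map, Int.toNat_natCast]
  simp only [rotY ice nn size m m (fun _ _ => 0) hs hnn (le_refl m)]
  have hcov : mkG nn (fun r c =>
      if r < m * size
      then pvGet2 ice (r / size * size + (size - 1 - c % size)) (c / size * size + r % size)
      else 0)
      = mkG nn (fun r c =>
          pvGet2 ice (r / size * size + (size - 1 - c % size)) (c / size * size + r % size)) := by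
    apply mkG_congr
    intro r hr c _
    rw [if_pos (by omega)]
  simp only [hcov]
  rw [tempChar nn (fun i j =>
      (List.range 4).foldl (fun (c : Int) (k : Nat) =>
        if (i : Int) + pvDi.getD k 0 < 0 ∨ (nn : Int) ≤ (i : Int) + pvDi.getD k 0 ∨
           (j : Int) + pvDj.getD k 0 < 0 ∨ (nn : Int) ≤ (j : Int) + pvDj.getD k 0 then c
        else if pvGet2 (mkG nn (fun r c =>
            pvGet2 ice (r / size * size + (size - 1 - c % size)) (c / size * size + r % size)))
            ((i : Int) + pvDi.getD k 0).toNat ((j : Int) + pvDj.getD k 0).toNat ≠ 0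
        then c + 1 else c) 0 < 3
      ∧ pvGet2 (mkG nn (fun r c =>
          pvGet2 ice (r / size * size + (size - 1 - c % size)) (c / size * size + r % size))) i j ≠ 0)]
  apply mkG_congr
  intro r hr c hc
  rw [cntEq _ nn r c hr hc]
  have hx : pvGet2 (mkG nn (fun r c =>
      pvGet2 ice (r / size * size + (size - 1 - c % size)) (c / size * size + r % size))) r c
      = pvGet2 ice (r / size * size + (size - 1 - c % size)) (c / size * size + r % size) := by
    rw [pvGet2_mk]
    exact if_pos ⟨hr, hc⟩
  rw [hx, ite_and_comm]

-- ===== B-side lemmas =====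

theorem min_getD_const (l : List Nat) (a : Nat) (hne : l ≠ []) (h : ∀ x ∈ l, x = a) :
    l.min?.getD 0 = a := by
  have hmem : a ∈ l := by
    rcases l with _ | ⟨x, l'⟩
    · exact absurd rfl hne
    · rw [← h x (by simp)]
      simp
  have hsome : l.min? = some a := List.min?_eq_some_iff.mpr ⟨hmem, fun b hb => by rw [h b hb]⟩
  rw [hsome]
  rfl

-- sliced-drop-take of a tabulated row
theorem drop_take_range_map (nn src s : Nat) (h : Nat → Int) (hle : src + s ≤ nn) :
    (((List.range nn).map h).drop src).take s = (List.range s).map (fun t => h (src + t)) := by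
  apply List.ext_getElem
  · simp
    omega
  · intro i h1 h2
    simp only [List.getElem_take, List.getElem_drop, List.getElem_map, List.getElem_range]

-- concatenating m tabulated s-segments is one tabulated m*s row
theorem flatMap_range_blocks {α : Type} (m s : Nat) (hs : 0 < s) (f : Nat → Nat → α) :
    (List.range m).flatMap (fun k => (List.range s).map (f k))
      = (List.range (m * s)).map (fun c => f (c / s) (c % s)) := by
  induction m with
  | zero => simp
  | succ m ih =>
      rw [List.range_succ, List.flatMap_append, ih, Nat.succ_mul, List.range_add,
        List.map_append, List.map_map]
      have h2 : (List.map ((fun c => f (c / s) (c % s)) ∘ (fun x => m * s + x)) (List.range s))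
          = List.map (f m) (List.range s) := by
        apply List.map_congr_left
        intro t ht
        have htlt : t < s := List.mem_range.mp ht
        have hdiv : (m * s + t) / s = m := by
          rw [Nat.mul_comm m s, Nat.mul_add_div hs, Nat.div_eq_of_lt htlt, Nat.add_zero]
        have hmod : (m * s + t) % s = t := by
          rw [Nat.mul_comm m s, Nat.mul_add_mod, Nat.mod_eq_of_lt htlt]
        simp only [Function.comp_apply, hdiv, hmod]
      rw [h2]
      simp

-- [0] + row[:-1] of a tabulated row
theorem cons_dropLast_range_map (nn : Nat) (g : Nat → Int) (hnn : 0 < nn) :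
    (0 : Int) :: ((List.range nn).map g).dropLast
      = (List.range nn).map (fun c => if 0 < c then g (c - 1) else 0) := by
  apply List.ext_getElem
  · simp
    omega
  · intro i h1 h2
    simp only [List.length_map, List.length_range] at h2
    rcases i with _ | i
    · simp
    · simp only [List.getElem_cons_succ, List.getElem_dropLast, List.getElem_map,
        List.getElem_range]
      rw [if_pos (by omega)]
      congr 1

-- row[1:] + [0] of a tabulated row
theorem tail_append_range_map (nn : Nat) (g : Nat → Int) (hnn : 0 < nn) :
    ((List.range nn).map g).tail ++ [(0 : Int)]
      = (List.range nn).map (fun c => if c < nn - 1 then g (c + 1) else 0) := by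
  apply List.ext_getElem
  · simp
    omega
  · intro i h1 h2
    simp only [List.length_map, List.length_range] at h2
    by_cases hi : i < nn - 1
    · rw [List.getElem_append_left (by simp; omega)]
      rw [List.getElem_tail]
      simp only [List.getElem_map, List.getElem_range]
      rw [if_pos hi]
    · rw [List.getElem_append_right (by simp; omega)]
      simp only [List.getElem_map, List.getElem_range]
      rw [if_neg hi]
      simp

-- ===== B reduces to the closed form =====
theorem pyZipStar_eq (rows : List (List Int)) (nn : Nat)
    (hlen : rows.length = nn) (hrl : ∀ r ∈ rows, r.length = nn) (hnn : 0 < nn) :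
    pyZipStar rows = (List.range nn).map (fun a => rows.map (fun r => r.getD a 0)) := by
  rcases rows with _ | ⟨r0, rs⟩
  · simp at hlen
    omega
  · have hmin : (((r0 :: rs).map List.length).min?).getD 0 = nn := by
      apply min_getD_const
      · simp
      · intro x hx
        obtain ⟨r, hr, he⟩ := List.mem_map.mp hx
        rw [← he]
        exact hrl r hr
    show (List.range ((((r0 :: rs).map List.length).min?).getD 0)).map
        (fun a => (r0 :: rs).map (fun r => r.getD a 0)) = _
    rw [hmin]

theorem getD_take (l : List Int) (nn a : Nat) (ha : a < nn) (_hl : nn ≤ l.length) :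
    (l.take nn).getD a 0 = l.getD a 0 := by
  rw [List.getD_eq_getElem?_getD, List.getD_eq_getElem?_getD, List.getElem?_take_of_lt ha]

theorem reverse_range_map {α : Type} (nn : Nat) (h : Nat → α) :
    ((List.range nn).map h).reverse = (List.range nn).map (fun b => h (nn - 1 - b)) := by
  apply List.ext_getElem
  · simp
  · intro i h1 h2
    simp [List.getElem_reverse]

def mkG_eq_map (nn : Nat) (f : Nat → Nat → Int) :
    mkG nn f = (List.range nn).map (fun r => (List.range nn).map (f r)) := rfl

-- B's melting loop over any rotated grid G: shifted-mask sums equal the four-indicator count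
theorem meltChar (nn : Nat) (G : Nat → Nat → Int) (hnn : 0 < nn) :
    (List.range nn).foldl (fun out r =>
      out ++ [(((mkG nn G).getD r []).zip
        ((((if 0 < r then ((mkG nn G).map (fun row => row.map (fun v => if v ≠ 0 then (1 : Int) else 0))).getD (r - 1) [] else List.replicate nn (0 : Int)).zip
            (if r < nn - 1 then ((mkG nn G).map (fun row => row.map (fun v => if v ≠ 0 then (1 : Int) else 0))).getD (r + 1) [] else List.replicate nn (0 : Int))).zip
          (((0 : Int) :: PySem.List.slice (((mkG nn G).map (fun row => row.map (fun v => if v ≠ 0 then (1 : Int) else 0))).getD r []) none (some (-1))).zip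
            (PySem.List.slice (((mkG nn G).map (fun row => row.map (fun v => if v ≠ 0 then (1 : Int) else 0))).getD r []) (some 1) none ++ [(0 : Int)]))).map
          (fun p => p.1.1 + p.1.2 + p.2.1 + p.2.2))).map
        (fun p => if p.1 ≠ 0 ∧ p.2 < 3 then p.1 - 1 else p.1)]) []
    = mkG nn (fun r c =>
        if G r c ≠ 0 ∧
            (if 0 < r ∧ pvGet2 (mkG nn G) (r - 1) c ≠ 0 then (1 : Int) else 0) +
            (if r < nn - 1 ∧ pvGet2 (mkG nn G) (r + 1) c ≠ 0 then 1 else 0) +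
            (if 0 < c ∧ pvGet2 (mkG nn G) r (c - 1) ≠ 0 then 1 else 0) +
            (if c < nn - 1 ∧ pvGet2 (mkG nn G) r (c + 1) ≠ 0 then 1 else 0) < 3
        then G r c - 1 else G r c) := by
  have hmask : (mkG nn G).map (fun row => row.map (fun v => if v ≠ 0 then (1 : Int) else 0))
      = mkG nn (fun r c => if G r c ≠ 0 then (1 : Int) else 0) := by
    rw [mkG_eq_map, mkG_eq_map, List.map_map]
    apply List.map_congr_left
    intro r _
    simp [List.map_map, Function.comp]
  rw [hmask]
  set ind : Nat → Nat → Int := fun r c => if G r c ≠ 0 then (1 : Int) else 0 with hind0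
  rw [PySem.List.foldl_append_singleton_eq_map _ _ [], List.nil_append]
  conv_rhs => rw [mkG_eq_map]
  apply List.map_congr_left
  intro r hrm
  have hr : r < nn := List.mem_range.mp hrm
  have hup : (if 0 < r then (mkG nn ind).getD (r - 1) [] else List.replicate nn (0 : Int))
      = (List.range nn).map (fun c => if 0 < r then ind (r - 1) c else 0) := by
    by_cases h : 0 < r
    · rw [if_pos h, mkG_eq_map, getD_range_map, if_pos (by omega)]
      apply List.map_congr_left
      intro c _
      rw [if_pos h]
    · rw [if_neg h]
      rw [show (List.range nn).map (fun c => if 0 < r then ind (r - 1) c else 0)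
          = (List.range nn).map (fun _ => (0 : Int)) from
        List.map_congr_left (fun c _ => if_neg h)]
      rw [List.map_const', List.length_range]
  have hdn : (if r < nn - 1 then (mkG nn ind).getD (r + 1) [] else List.replicate nn (0 : Int))
      = (List.range nn).map (fun c => if r < nn - 1 then ind (r + 1) c else 0) := by
    by_cases h : r < nn - 1
    · rw [if_pos h, mkG_eq_map, getD_range_map, if_pos (by omega)]
      apply List.map_congr_left
      intro c _
      rw [if_pos h]
    · rw [if_neg h]
      rw [show (List.range nn).map (fun c => if r < nn - 1 then ind (r + 1) c else 0)
          = (List.range nn).map (fun _ => (0 : Int)) from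
        List.map_congr_left (fun c _ => if_neg h)]
      rw [List.map_const', List.length_range]
  have hrowm : (mkG nn ind).getD r [] = (List.range nn).map (ind r) := by
    rw [mkG_eq_map, getD_range_map, if_pos hr]
  have hleft : (0 : Int) :: PySem.List.slice ((mkG nn ind).getD r []) none (some (-1))
      = (List.range nn).map (fun c => if 0 < c then ind r (c - 1) else 0) := by
    rw [hrowm, PySem.List.slice_to_neg_one]
    exact cons_dropLast_range_map nn (ind r) hnn
  have hright : PySem.List.slice ((mkG nn ind).getD r []) (some 1) none ++ [(0 : Int)]
      = (List.range nn).map (fun c => if c < nn - 1 then ind r (c + 1) else 0) := by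
    rw [hrowm, PySem.List.slice_from_one]
    exact tail_append_range_map nn (ind r) hnn
  have hgrow : (mkG nn G).getD r [] = (List.range nn).map (G r) := by
    rw [mkG_eq_map, getD_range_map, if_pos hr]
  rw [hup, hdn, hleft, hright, List.zip_map', List.zip_map', List.zip_map', List.map_map,
    hgrow, List.zip_map', List.map_map]
  apply List.map_congr_left
  intro c hcm
  have hc : c < nn := List.mem_range.mp hcm
  simp only [Function.comp_apply]
  have e1 : (if 0 < r ∧ pvGet2 (mkG nn G) (r - 1) c ≠ 0 then (1 : Int) else 0)
      = (if 0 < r then ind (r - 1) c else 0) := by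
    by_cases h : 0 < r
    · have hval : pvGet2 (mkG nn G) (r - 1) c = G (r - 1) c := by
        rw [pvGet2_mk]
        exact if_pos ⟨by omega, hc⟩
      rw [hval, if_pos h]
      simp only [hind0]
      by_cases h2 : G (r - 1) c ≠ 0
      · rw [if_pos ⟨h, h2⟩, if_pos h2]
      · rw [if_neg (by tauto), if_neg h2]
    · rw [if_neg (by tauto), if_neg h]
  have e2 : (if r < nn - 1 ∧ pvGet2 (mkG nn G) (r + 1) c ≠ 0 then (1 : Int) else 0)
      = (if r < nn - 1 then ind (r + 1) c else 0) := by
    by_cases h : r < nn - 1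
    · have hval : pvGet2 (mkG nn G) (r + 1) c = G (r + 1) c := by
        rw [pvGet2_mk]
        exact if_pos ⟨by omega, hc⟩
      rw [hval, if_pos h]
      simp only [hind0]
      by_cases h2 : G (r + 1) c ≠ 0
      · rw [if_pos ⟨h, h2⟩, if_pos h2]
      · rw [if_neg (by tauto), if_neg h2]
    · rw [if_neg (by tauto), if_neg h]
  have e3 : (if 0 < c ∧ pvGet2 (mkG nn G) r (c - 1) ≠ 0 then (1 : Int) else 0)
      = (if 0 < c then ind r (c - 1) else 0) := by
    by_cases h : 0 < c
    · have hval : pvGet2 (mkG nn G) r (c - 1) = G r (c - 1) := by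
        rw [pvGet2_mk]
        exact if_pos ⟨hr, by omega⟩
      rw [hval, if_pos h]
      simp only [hind0]
      by_cases h2 : G r (c - 1) ≠ 0
      · rw [if_pos ⟨h, h2⟩, if_pos h2]
      · rw [if_neg (by tauto), if_neg h2]
    · rw [if_neg (by tauto), if_neg h]
  have e4 : (if c < nn - 1 ∧ pvGet2 (mkG nn G) r (c + 1) ≠ 0 then (1 : Int) else 0)
      = (if c < nn - 1 then ind r (c + 1) else 0) := by
    by_cases h : c < nn - 1
    · have hval : pvGet2 (mkG nn G) r (c + 1) = G r (c + 1) := by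
        rw [pvGet2_mk]
        exact if_pos ⟨hr, by omega⟩
      rw [hval, if_pos h]
      simp only [hind0]
      by_cases h2 : G r (c + 1) ≠ 0
      · rw [if_pos ⟨h, h2⟩, if_pos h2]
      · rw [if_neg (by tauto), if_neg h2]
    · rw [if_neg (by tauto), if_neg h]
  rw [e1, e2, e3, e4]

theorem B_to_model (ice : List (List Int)) (N L : Int)
    (hpre : Pre_rotate_melting ice N L) :
    rotate_melting_alt ice N L = modelOut ice (2 ^ N.toNat) (2 ^ L.toNat) := by
  obtain ⟨hN, hL, hLN, hlen, hrows⟩ := hpre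
  unfold rotate_melting_alt
  dsimp only
  set nn : Nat := 2 ^ N.toNat with hnn0
  set s : Nat := 2 ^ L.toNat with hs0
  have hs : 0 < s := Nat.two_pow_pos _
  have hnpos : 0 < nn := Nat.two_pow_pos _
  have hdvd : s ∣ nn := pow_dvd_pow 2 (by omega)
  have hm : nn / s * s = nn := Nat.div_mul_cancel hdvd
  set m : Nat := nn / s with hm0
  have hnn : nn = m * s := hm.symm
  have hmpos : 0 < m := Nat.div_pos (Nat.le_of_dvd hnpos hdvd) hs
  -- the reversed clipped rows
  have hslice : PySem.List.slice ice none (some (nn : Int)) = ice.take nn :=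
    PySem.List.slice_to_natCast ice nn
  have hiceTake : ice.take nn = (List.range nn).map (fun i => ice.getD i []) := by
    apply List.ext_getElem
    · simp
      omega
    · intro i h1 h2
      rw [List.length_take] at h1
      simp only [List.getElem_take, List.getElem_map, List.getElem_range]
      rw [List.getD_eq_getElem?_getD, List.getElem?_eq_getElem (by omega)]
      rfl
  have hrowsEq : ((PySem.List.slice ice none (some (nn : Int))).map
        (fun row => PySem.List.slice row none (some (nn : Int)))).reverse
      = (List.range nn).map (fun b => (ice.getD (nn - 1 - b) []).take nn) := by
    rw [hslice, hiceTake, List.map_map, reverse_range_map]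
    apply List.map_congr_left
    intro b _
    simp only [Function.comp_apply]
    rw [PySem.List.slice_to_natCast]
  have hrowLong : ∀ b < nn, nn ≤ (ice.getD (nn - 1 - b) []).length := by
    intro b hb
    have hmem : ice.getD (nn - 1 - b) [] ∈ ice.take nn := by
      rw [List.getD_eq_getElem?_getD, List.getElem?_eq_getElem (by omega)]
      simp only [Option.getD_some]
      apply List.mem_take_iff_getElem.mpr
      exact ⟨nn - 1 - b, by omega, rfl⟩
    exact hrows _ hmem
  -- G
  have hGeq : pyZipStar ((List.range nn).map (fun b => (ice.getD (nn - 1 - b) []).take nn))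
      = mkG nn (fun a b => pvGet2 ice (nn - 1 - b) a) := by
    rw [pyZipStar_eq _ nn (by simp) (fun r hr => by
      obtain ⟨b, hb, he⟩ := List.mem_map.mp hr
      rw [← he, List.length_take]
      have := hrowLong b (List.mem_range.mp hb)
      omega) hnpos]
    rw [mkG_eq_map]
    apply List.map_congr_left
    intro a ha
    have halt : a < nn := List.mem_range.mp ha
    rw [List.map_map]
    apply List.map_congr_left
    intro b hb
    have hblt : b < nn := List.mem_range.mp hb
    simp only [Function.comp_apply]
    rw [getD_take _ nn a halt (hrowLong b hblt)]
    rfl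
  rw [hrowsEq, hGeq]
  -- grid
  have hGrow : ∀ i < nn, (mkG nn (fun a b => pvGet2 ice (nn - 1 - b) a)).getD i []
      = (List.range nn).map (fun b => pvGet2 ice (nn - 1 - b) i) := by
    intro i hi
    rw [mkG_eq_map, getD_range_map, if_pos hi]
  have hgrid : (List.range m).flatMap (fun q => (List.range s).map (fun j =>
      (List.range m).flatMap (fun k =>
        PySem.List.slice ((mkG nn (fun a b => pvGet2 ice (nn - 1 - b) a)).getD (k * s + j) [])
          (some (((m - 1 - q) * s : Nat) : Int)) (some (((m - q) * s : Nat) : Int)))))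
      = mkG nn (fun r c => pvGet2 ice (r / s * s + (s - 1 - c % s)) (c / s * s + r % s)) := by
    have hinner : ∀ q < m, ∀ j < s,
        (List.range m).flatMap (fun k =>
          PySem.List.slice ((mkG nn (fun a b => pvGet2 ice (nn - 1 - b) a)).getD (k * s + j) [])
            (some (((m - 1 - q) * s : Nat) : Int)) (some (((m - q) * s : Nat) : Int)))
        = (List.range nn).map (fun c => pvGet2 ice ((q * s + j) / s * s + (s - 1 - c % s)) (c / s * s + (q * s + j) % s)) := by
      intro q hq j hj
      have hqs : (m - 1 - q) * s + s = (m - q) * s := by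
        have h := Nat.succ_mul (m - 1 - q) s
        rw [Nat.succ_eq_add_one, show m - 1 - q + 1 = m - q by omega] at h
        omega
      have hqle : (m - q) * s ≤ m * s := Nat.mul_le_mul_right s (by omega)
      have hqbelow : q * s + s ≤ m * s := by
        have h := Nat.mul_le_mul_right s (show q + 1 ≤ m by omega)
        rw [Nat.add_mul, Nat.one_mul] at h
        omega
      have hqlow : (m - 1 - q) * s + (q * s + s) = m * s := by
        have h1 : (m - 1 - q + (q + 1)) * s = m * s := by
          congr 1
          omega
        rw [Nat.add_mul, Nat.add_mul, Nat.one_mul] at h1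
        omega
      have hstep : ∀ k < m,
          PySem.List.slice ((mkG nn (fun a b => pvGet2 ice (nn - 1 - b) a)).getD (k * s + j) [])
            (some (((m - 1 - q) * s : Nat) : Int)) (some (((m - q) * s : Nat) : Int))
          = (List.range s).map (fun t => pvGet2 ice (q * s + (s - 1 - t)) (k * s + j)) := by
        intro k hk
        have hks : k * s + s ≤ m * s := by
          have h := Nat.mul_le_mul_right s (show k + 1 ≤ m by omega)
          rw [Nat.add_mul, Nat.one_mul] at h
          omega
        have hidx : k * s + j < nn := by
          rw [hnn]
          omega
        rw [hGrow _ hidx, PySem.List.slice_natCast]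
        have hsub : ((m - q) * s : Nat) - ((m - 1 - q) * s : Nat) = s := by omega
        rw [hsub, drop_take_range_map nn ((m - 1 - q) * s) s _ (by rw [hnn]; omega)]
        apply List.map_congr_left
        intro t ht
        have htlt : t < s := List.mem_range.mp ht
        congr 1
        rw [hnn]
        omega
      rw [List.flatMap_congr (fun k hk => hstep k (List.mem_range.mp hk)),
        flatMap_range_blocks m s hs (fun k t => pvGet2 ice (q * s + (s - 1 - t)) (k * s + j))]
      rw [hnn]
      apply List.map_congr_left
      intro c hc
      have hdq : (q * s + j) / s = q := by
        rw [Nat.mul_comm q s, Nat.mul_add_div hs, Nat.div_eq_of_lt hj, Nat.add_zero]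
      have hmq : (q * s + j) % s = j := by
        rw [Nat.mul_comm q s, Nat.mul_add_mod, Nat.mod_eq_of_lt hj]
      rw [hdq, hmq]
    rw [List.flatMap_congr (fun q hq => by
      apply List.map_congr_left
      intro j hj
      exact hinner q (List.mem_range.mp hq) j (List.mem_range.mp hj))]
    rw [flatMap_range_blocks m s hs]
    rw [mkG_eq_map, hnn]
    apply List.map_congr_left
    intro r hr
    have hrd : r / s * s + r % s = r := Nat.div_add_mod' r s
    rw [hrd]
  rw [hgrid]
  exact meltChar nn
    (fun r c => pvGet2 ice (r / s * s + (s - 1 - c % s)) (c / s * s + r % s)) hnpos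

-- ===== VERDICT (by name: the statement is the Claim_ definition above) =====
theorem rotate_melting_spec : Claim_equal_rotate_melting := by
  intro ice N L _ hpre
  unfold Spec_rotate_melting
  rw [A_to_model ice N L hpre, B_to_model ice N L hpre]
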